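-- pv_equiv track=rewrite | github.com/Rotz-kirwa/Agent-21-Scout | telegram_jobs.py | fetch_static_jobs
-- ===== SOURCE A (Python) =====
-- def fetch_static_jobs(keywords):
--     """
--     Fetch from static job sources that don't require API calls
--     """
--     jobs = []
--
--     # IT Support jobs
--     if any(word in keywords for word in ["support", "helpdesk", "it", "technical"]):
--         jobs.extend([
--             {
--                 "title": "Technical Support Specialist",
--                 "company": "SupportNinja",
--                 "location": "Remote - Worldwide",
--                 "url": "https://supportninja.com/careers/",
--                 "source": "SupportNinja",
--                 "salary": "$15-30/hour"
--             },
--             {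
--                 "title": "IT Helpdesk Remote",
--                 "company": "LiveWorld",
--                 "location": "Remote - Global",
--                 "url": "https://www.liveworld.com/careers/",
--                 "source": "LiveWorld",
--                 "salary": "$18-35/hour"
--             }
--         ])
--
--     # Virtual Assistant jobs
--     if any(word in keywords for word in ["assistant", "admin", "virtual"]):
--         jobs.extend([
--             {
--                 "title": "Virtual Assistant",
--                 "company": "Fancy Hands",
--                 "location": "Remote - Any Country",
--                 "url": "https://www.fancyhands.com/jobs",
--                 "source": "Fancy Hands",
--                 "salary": "$12-20/hour"
--             }
--         ])
--
--     # Content Writing jobs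
--     if any(word in keywords for word in ["writer", "content", "copywriter"]):
--         jobs.extend([
--             {
--                 "title": "Content Writer",
--                 "company": "Scripted",
--                 "location": "Remote - Worldwide",
--                 "url": "https://scripted.com/writers",
--                 "source": "Scripted",
--                 "salary": "$15-40/hour"
--             }
--         ])
--
--     return jobs
-- ===== SOURCE B (Python) =====
-- _KW_CAT = {
--     "support": 0, "helpdesk": 0, "it": 0, "technical": 0,
--     "assistant": 1, "admin": 1, "virtual": 1,
--     "writer": 2, "content": 2, "copywriter": 2,
-- }
--
-- _GROUPS = [
--     [
--         {
--             "title": "Technical Support Specialist",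
--             "company": "SupportNinja",
--             "location": "Remote - Worldwide",
--             "url": "https://supportninja.com/careers/",
--             "source": "SupportNinja",
--             "salary": "$15-30/hour"
--         },
--         {
--             "title": "IT Helpdesk Remote",
--             "company": "LiveWorld",
--             "location": "Remote - Global",
--             "url": "https://www.liveworld.com/careers/",
--             "source": "LiveWorld",
--             "salary": "$18-35/hour"
--         }
--     ],
--     [
--         {
--             "title": "Virtual Assistant",
--             "company": "Fancy Hands",
--             "location": "Remote - Any Country",
--             "url": "https://www.fancyhands.com/jobs",
--             "source": "Fancy Hands",
--             "salary": "$12-20/hour"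
--         }
--     ],
--     [
--         {
--             "title": "Content Writer",
--             "company": "Scripted",
--             "location": "Remote - Worldwide",
--             "url": "https://scripted.com/writers",
--             "source": "Scripted",
--             "salary": "$15-40/hour"
--         }
--     ],
-- ]
--
--
-- def fetch_static_jobs(keywords):
--     """
--     Fetch from static job sources that don't require API calls
--     """
--     # One pass over the caller's keywords: classify each keyword into a
--     # category index via a hash map, collecting the set of hit categories.
--     matched = set()
--     for kw in keywords:
--         cat = _KW_CAT.get(kw)
--         if cat is not None:
--             matched.add(cat)
--     # Emit the job groups of the matched categories in fixed category order.
--     jobs = []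
--     for i, group in enumerate(_GROUPS):
--         if i in matched:
--             jobs.extend(group)
--     return jobs
-- ===== Notes on version B (the rewrite author's own statement) =====
-- stated objective: alternative
-- what changed: Inverts the traversal: instead of testing each hard-coded category keyword against the input list (membership scans per category), B makes one pass over the input keywords, classifying each through a keyword-to-category hash map into a set of matched category indices, then emits the job groups of matched categories in fixed order; correct because the category keyword lists are disjoint.
import Mathlib
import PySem

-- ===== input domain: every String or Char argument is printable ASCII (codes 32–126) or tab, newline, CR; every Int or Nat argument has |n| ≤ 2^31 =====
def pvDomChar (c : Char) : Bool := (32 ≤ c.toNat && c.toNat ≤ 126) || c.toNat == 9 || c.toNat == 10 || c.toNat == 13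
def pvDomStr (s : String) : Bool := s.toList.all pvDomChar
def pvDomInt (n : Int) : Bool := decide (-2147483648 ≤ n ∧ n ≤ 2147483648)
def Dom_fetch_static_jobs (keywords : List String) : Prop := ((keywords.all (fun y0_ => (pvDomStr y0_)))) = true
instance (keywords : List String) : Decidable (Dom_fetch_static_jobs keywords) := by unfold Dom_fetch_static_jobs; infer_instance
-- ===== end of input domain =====

-- B inverts the traversal: one pass over the input keywords through a keyword→category map
-- collecting the set of matched category indices, then the matched job groups are emitted in
-- fixed category order (alternative decomposition; same output, the category word lists are disjoint).

-- ===== PORT A =====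
-- literal transliteration: jobs = []; three ifs, each scanning its category words against keywords and extending jobs
def fetch_static_jobs (keywords : List String) : List (List (String × String)) :=
  let jobs : List (List (String × String)) := []
  let jobs := if (["support", "helpdesk", "it", "technical"].any (fun word => keywords.contains word)) then
      jobs ++ [
        [("title", "Technical Support Specialist"), ("company", "SupportNinja"),
         ("location", "Remote - Worldwide"), ("url", "https://supportninja.com/careers/"),
         ("source", "SupportNinja"), ("salary", "$15-30/hour")],
        [("title", "IT Helpdesk Remote"), ("company", "LiveWorld"),
         ("location", "Remote - Global"), ("url", "https://www.liveworld.com/careers/"),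
         ("source", "LiveWorld"), ("salary", "$18-35/hour")]]
    else jobs
  let jobs := if (["assistant", "admin", "virtual"].any (fun word => keywords.contains word)) then
      jobs ++ [
        [("title", "Virtual Assistant"), ("company", "Fancy Hands"),
         ("location", "Remote - Any Country"), ("url", "https://www.fancyhands.com/jobs"),
         ("source", "Fancy Hands"), ("salary", "$12-20/hour")]]
    else jobs
  let jobs := if (["writer", "content", "copywriter"].any (fun word => keywords.contains word)) then
      jobs ++ [
        [("title", "Content Writer"), ("company", "Scripted"),
         ("location", "Remote - Worldwide"), ("url", "https://scripted.com/writers"),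
         ("source", "Scripted"), ("salary", "$15-40/hour")]]
    else jobs
  jobs

-- ===== PORT B =====
-- Source B's module-level keyword→category dict _KW_CAT
def pvKwCat : PySem.Dict String Int := PySem.Dict.ofList
  [("support", 0), ("helpdesk", 0), ("it", 0), ("technical", 0),
   ("assistant", 1), ("admin", 1), ("virtual", 1),
   ("writer", 2), ("content", 2), ("copywriter", 2)]

-- Source B's module-level list of job groups _GROUPS
def pvGroups : List (List (List (String × String))) :=
  [ [ [("title", "Technical Support Specialist"), ("company", "SupportNinja"),
       ("location", "Remote - Worldwide"), ("url", "https://supportninja.com/careers/"),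
       ("source", "SupportNinja"), ("salary", "$15-30/hour")],
      [("title", "IT Helpdesk Remote"), ("company", "LiveWorld"),
       ("location", "Remote - Global"), ("url", "https://www.liveworld.com/careers/"),
       ("source", "LiveWorld"), ("salary", "$18-35/hour")] ],
    [ [("title", "Virtual Assistant"), ("company", "Fancy Hands"),
       ("location", "Remote - Any Country"), ("url", "https://www.fancyhands.com/jobs"),
       ("source", "Fancy Hands"), ("salary", "$12-20/hour")] ],
    [ [("title", "Content Writer"), ("company", "Scripted"),
       ("location", "Remote - Worldwide"), ("url", "https://scripted.com/writers"),
       ("source", "Scripted"), ("salary", "$15-40/hour")] ] ]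

def fetch_static_jobs_alt (keywords : List String) : List (List (String × String)) :=
  -- one pass over keywords: matched = set of category indices hit
  let matched : PySem.Set Int := keywords.foldl
    (fun s kw => match pvKwCat.get? kw with
      | some cat => PySem.Set.add s cat
      | none => s)
    PySem.Set.empty
  -- emit the groups of matched categories in fixed order
  (PySem.List.enumerate pvGroups).foldl
    (fun jobs p => if PySem.Set.contains matched p.1 then jobs ++ p.2 else jobs) []

-- ===== PRECONDITION & SPEC =====
def Spec_fetch_static_jobs (keywords : List String) (out : List (List (String × String))) : Prop := out = fetch_static_jobs_alt keywords
instance (keywords : List String) (out : List (List (String × String))) : Decidable (Spec_fetch_static_jobs keywords out) := by unfold Spec_fetch_static_jobs; infer_instance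

-- ===== CLAIM =====
def Claim_equal_fetch_static_jobs : Prop := ∀ (keywords : List String), Dom_fetch_static_jobs keywords → Spec_fetch_static_jobs keywords (fetch_static_jobs keywords)

-- ===== LEMMAS AND PROOFS =====

-- membership in the matched set = some keyword maps to that category
theorem mem_matched (keywords : List String) (c : Int) (s : PySem.Set Int) :
    (keywords.foldl
      (fun s kw => match pvKwCat.get? kw with
        | some cat => PySem.Set.add s cat
        | none => s) s).contains c
    = (s.contains c || keywords.any (fun kw => pvKwCat.get? kw == some c)) := by
  induction keywords generalizing s with
  | nil => simp [PySem.Set.contains]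
  | cons kw rest ih =>
    simp only [List.foldl_cons, List.any_cons]
    cases h : pvKwCat.get? kw with
    | none => rw [ih]; simp
    | some cat =>
      rw [ih, Bool.eq_iff_iff]
      simp [PySem.Set.contains, PySem.Set.mem_add]
      by_cases hc : cat = c <;> simp [hc, eq_comm] <;> tauto

-- pvKwCat as the literal association list it builds to
theorem kwCat_mk : pvKwCat = PySem.Dict.mk
    [("support", 0), ("helpdesk", 0), ("it", 0), ("technical", 0),
     ("assistant", 1), ("admin", 1), ("virtual", 1),
     ("writer", 2), ("content", 2), ("copywriter", 2)] := by decide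

set_option maxRecDepth 8000 in
-- classifying through the dict hits category c iff the keyword is one of c's words
theorem lookup_cat (kw : String) (c : Int) :
    (pvKwCat.get? kw == some c)
    = (([(["support", "helpdesk", "it", "technical"], (0:Int)),
         (["assistant", "admin", "virtual"], 1),
         (["writer", "content", "copywriter"], 2)].any
        (fun r => r.1.contains kw && r.2 == c))) := by
  rw [kwCat_mk]
  simp only [PySem.Dict.get?_mk_cons, List.any_cons, List.any_nil,
    List.contains_cons, List.contains_nil]
  split_ifs <;> simp_all
  all_goals (try intro h) <;> subst_vars <;> (try simp_all) <;> (try simp_all [show ∀ k : String, (PySem.Dict.mk ([] : List (String × Int))).get? k = none from fun _ => rfl]) <;> (try aesop)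

-- ===== VERDICT =====
theorem fetch_static_jobs_spec : Claim_equal_fetch_static_jobs := by
  intro keywords _
  unfold Spec_fetch_static_jobs fetch_static_jobs fetch_static_jobs_alt pvGroups
  simp only [PySem.List.enumerate_cons, PySem.List.enumerate_nil, List.foldl_cons, List.foldl_nil]
  simp only [show ((0:Int)+1)=1 from rfl, show ((1:Int)+1)=2 from rfl]
  rw [mem_matched, mem_matched, mem_matched]
  simp only [PySem.Set.contains, PySem.Set.empty, List.elem_nil, Bool.false_or]
  have h0 : (keywords.any (fun kw => pvKwCat.get? kw == some 0))
      = (["support", "helpdesk", "it", "technical"].any (fun word => keywords.contains word)) := by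
    rw [Bool.eq_iff_iff]
    simp [lookup_cat, List.contains_eq_mem]
    aesop
  have h1 : (keywords.any (fun kw => pvKwCat.get? kw == some 1))
      = (["assistant", "admin", "virtual"].any (fun word => keywords.contains word)) := by
    rw [Bool.eq_iff_iff]
    simp [lookup_cat, List.contains_eq_mem]
    aesop
  have h2 : (keywords.any (fun kw => pvKwCat.get? kw == some 2))
      = (["writer", "content", "copywriter"].any (fun word => keywords.contains word)) := by
    rw [Bool.eq_iff_iff]
    simp [lookup_cat, List.contains_eq_mem]
    aesop
  rw [h0, h1, h2]
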